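-- pv_equiv track=rewrite | github.com/updaun/CodingTest | programmers/2023/231024_1.py | solution
-- ===== SOURCE A (Python) =====
-- from itertools import permutations
--
-- def solution(ability):
--     answer = 0
--     n, m = len(ability), len(ability[0])
--     indexs = list(range(n))
--     for com in permutations(indexs, m):
--         temp = [ability[v][i] for i, v in enumerate(com)]
--         sum_temp = sum(temp)
--         answer = max(answer, sum_temp)
--     return answer
-- ===== SOURCE B (Python) =====
-- def solution(ability):
--     # DFS over columns with a shrinking set of available rows, instead of
--     # materialising every permutation and re-scoring it from scratch.
--     n, m = len(ability), len(ability[0])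
--     if n < m:
--         return 0
--
--     def best(col, avail):
--         if col == m:
--             return 0
--         return max(ability[r][col] + best(col + 1, avail - {r}) for r in avail)
--
--     return max(0, best(0, frozenset(range(n))))
-- ===== Notes on version B (the rewrite author's own statement) =====
-- stated objective: alternative
-- what changed: Replaces itertools.permutations enumeration with per-tuple rescoring by a recursive DFS over columns that carries a shrinking frozenset of available rows and a shared score prefix, guarding the degenerate n < m case explicitly.
import Mathlib
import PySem

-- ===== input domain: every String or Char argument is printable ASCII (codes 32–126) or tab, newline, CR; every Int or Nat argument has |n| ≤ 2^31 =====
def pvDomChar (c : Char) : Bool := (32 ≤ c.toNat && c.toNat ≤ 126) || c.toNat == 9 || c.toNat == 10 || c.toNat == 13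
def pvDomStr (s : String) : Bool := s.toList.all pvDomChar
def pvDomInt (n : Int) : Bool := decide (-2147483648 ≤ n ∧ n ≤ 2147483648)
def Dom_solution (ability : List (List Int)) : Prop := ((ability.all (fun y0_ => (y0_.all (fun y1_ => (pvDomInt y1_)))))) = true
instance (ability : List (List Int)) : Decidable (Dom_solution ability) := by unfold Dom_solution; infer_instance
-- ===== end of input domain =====

-- B replaces A's "enumerate every permutation with itertools and re-score each tuple from scratch"
-- by a recursive DFS over columns with a shrinking set of available rows (objective: alternative).

-- shared accessor: ability[v][i] (total form; Pre_ keeps every admitted index in range)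
def pvAt (ability : List (List Int)) (v i : Int) : Int :=
  PySem.List.pyGetD (PySem.List.pyGetD ability v []) i 0

-- ===== PORT A =====
def solution (ability : List (List Int)) : Int :=
  let n : Nat := ability.length
  let m : Nat := (PySem.List.pyGetD ability 0 []).length
  let indexs : List Int := PySem.List.pyRange 0 (n : Int) 1
  (PySem.List.permutations indexs m).foldl
    (fun answer com =>
      let temp := (PySem.List.enumerate com 0).map (fun iv => pvAt ability iv.2 iv.1)
      let sum_temp := temp.sum
      max answer sum_temp) 0

-- ===== PORT B =====
-- best(col, avail) of Source B; fuel k = m - col makes the recursion structural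
def bestAux (ability : List (List Int)) : Nat → Int → PySem.Set Int → Int
  | 0, _, _ => 0
  | k+1, col, avail =>
      (PySem.List.max?
        (avail.map (fun r =>
          pvAt ability r col + bestAux ability k (col + 1) (PySem.Set.diff avail [r])))
        (fun x => x)).getD 0

def solution_alt (ability : List (List Int)) : Int :=
  let n : Nat := ability.length
  let m : Nat := (PySem.List.pyGetD ability 0 []).length
  if n < m then 0
  else max 0 (bestAux ability m 0 (PySem.Set.ofList (PySem.List.pyRange 0 (n : Int) 1)))

-- ===== PRECONDITION & SPEC =====
-- Pre_ excludes exactly the inputs where the Python A raises: an empty matrix (IndexError on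
-- ability[0]), and a matrix with at least as many rows as columns in which some row is shorter
-- than the first row (IndexError on ability[v][i]).
def Pre_solution (ability : List (List Int)) : Prop :=
  ability ≠ [] ∧
    (ability.length < (ability.headD []).length ∨
      ∀ row ∈ ability, (ability.headD []).length ≤ row.length)

instance (ability : List (List Int)) : Decidable (Pre_solution ability) := by
  unfold Pre_solution; infer_instance

def pvWitness_solution : List (List Int) := [[1, 2], [3, 4]]

def Spec_solution (ability : List (List Int)) (out : Int) : Prop := out = solution_alt ability
instance (ability : List (List Int)) (out : Int) : Decidable (Spec_solution ability out) := by
  unfold Spec_solution; infer_instance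

-- ===== CLAIM (what is proved, stated in full; the proofs are below) =====
def Claim_equal_solution : Prop :=
  ∀ (ability : List (List Int)), Dom_solution ability → Pre_solution ability →
    Spec_solution ability (solution ability)

-- ===== LEMMAS AND PROOFS =====

-- score of one permutation tuple, with the column offset generalized for the induction
def scoreA (ability : List (List Int)) (c : Int) (com : List Int) : Int :=
  ((PySem.List.enumerate com c).map (fun iv => pvAt ability iv.2 iv.1)).sum

-- max of a nonempty list (0 on [], never used there)
def bigmax : List Int → Int
  | [] => 0
  | x :: t => t.foldl max x

-- index-based recursion mirroring the permutation tree of A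
def bestL (ability : List (List Int)) : Nat → Int → List Int → Int
  | 0, _, _ => 0
  | k+1, c, pool =>
      bigmax ((List.range pool.length).map
        (fun i => pvAt ability (pool.getD i 0) c + bestL ability k (c + 1) (pool.eraseIdx i)))

theorem scoreA_nil (ability : List (List Int)) (c : Int) : scoreA ability c [] = 0 := rfl

theorem scoreA_cons (ability : List (List Int)) (c : Int) (x : Int) (rest : List Int) :
    scoreA ability c (x :: rest) = pvAt ability x c + scoreA ability (c + 1) rest := by
  simp [scoreA, PySem.List.enumerate_cons]

theorem perms_succ (xs : List Int) (r : Nat) :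
    PySem.List.permutations xs (r + 1) =
      (List.range xs.length).flatMap
        (fun i => (PySem.List.permutations (xs.eraseIdx i) r).map (fun p => xs.getD i 0 :: p)) := by
  rw [PySem.List.permutations.eq_def]
  apply List.flatMap_congr
  intro i hi
  rw [List.mem_range] at hi
  simp [List.getElem?_eq_getElem hi]

theorem foldl_max_inner (α : Type) (f : α → Int) (tl : List α) :
    ∀ (s acc t : Int),
      tl.foldl (fun ans y => max ans (t + f y)) (max acc (t + s)) =
        max acc (t + tl.foldl (fun b y => max b (f y)) s) := by
  induction tl with
  | nil => intro s acc t; rfl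
  | cons y tl ih =>
      intro s acc t
      simp only [List.foldl_cons]
      have h : max (max acc (t + s)) (t + f y) = max acc (t + max s (f y)) := by omega
      rw [h, ih]

theorem foldl_max_shift (α : Type) (f : α → Int) (l : List α) (hl : l ≠ []) (acc t : Int) :
    l.foldl (fun ans x => max ans (t + f x)) acc = max acc (t + bigmax (l.map f)) := by
  cases l with
  | nil => exact absurd rfl hl
  | cons x tl =>
      simp only [List.foldl_cons, List.map_cons, bigmax, List.foldl_map]
      exact foldl_max_inner α f tl (f x) acc t

theorem main_fold (ability : List (List Int)) (k : Nat) :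
    ∀ (pool : List Int) (c acc t : Int), k ≤ pool.length →
      (PySem.List.permutations pool k).foldl
          (fun ans com => max ans (t + scoreA ability c com)) acc
        = max acc (t + bestL ability k c pool) := by
  induction k with
  | zero =>
      intro pool c acc t _
      rw [PySem.List.permutations_zero]
      simp [scoreA_nil, bestL]
  | succ k ih =>
      intro pool c acc t hk
      rw [perms_succ, List.foldl_flatMap]
      have hstep : ∀ (a : Int), ∀ i ∈ List.range pool.length,
          ((PySem.List.permutations (pool.eraseIdx i) k).map (fun p => pool.getD i 0 :: p)).foldl
              (fun ans com => max ans (t + scoreA ability c com)) a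
            = max a (t + (pvAt ability (pool.getD i 0) c + bestL ability k (c + 1) (pool.eraseIdx i))) := by
        intro a i hi
        rw [List.mem_range] at hi
        rw [List.foldl_map]
        have hfun : ∀ (ans : Int), ∀ p ∈ PySem.List.permutations (pool.eraseIdx i) k,
            max ans (t + scoreA ability c (pool.getD i 0 :: p)) =
              max ans ((t + pvAt ability (pool.getD i 0) c) + scoreA ability (c + 1) p) := by
          intro ans p _
          rw [scoreA_cons]; ring_nf
        rw [PySem.List.foldl_congr_mem _ _ _ _ hfun]
        rw [ih (pool.eraseIdx i) (c + 1) a (t + pvAt ability (pool.getD i 0) c)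
          (by rw [List.length_eraseIdx_of_lt hi]; omega)]
        ring_nf
      rw [PySem.List.foldl_congr_mem _ _ _ _ hstep]
      have hne : List.range pool.length ≠ [] := by
        simp only [ne_eq, List.range_eq_nil]; omega
      rw [foldl_max_shift Nat _ (List.range pool.length) hne acc t]
      rfl

theorem max?_getD_eq_bigmax (l : List Int) (hl : l ≠ []) :
    (PySem.List.max? l (fun x => x)).getD 0 = bigmax l := by
  cases l with
  | nil => exact absurd rfl hl
  | cons x t => rw [PySem.List.max?_id_cons]; rfl

theorem bestAux_eq_bestL (ability : List (List Int)) (k : Nat) :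
    ∀ (avail : List Int) (c : Int), avail.Nodup → k ≤ avail.length →
      bestAux ability k c avail = bestL ability k c avail := by
  induction k with
  | zero => intro avail c _ _; rfl
  | succ k ih =>
      intro avail c hnd hk
      have hmap :
          avail.map (fun r =>
              pvAt ability r c + bestAux ability k (c + 1) (PySem.Set.diff avail [r]))
            = (List.range avail.length).map
              (fun i => pvAt ability (avail.getD i 0) c + bestL ability k (c + 1) (avail.eraseIdx i)) := by
        apply List.ext_getElem
        · simp
        · intro i h1 h2
          simp only [List.getElem_map, List.getElem_range,
            List.getD_eq_getElem avail 0 (by simpa using h1)]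
          have hi : i < avail.length := by simpa using h1
          have hdiff : PySem.Set.diff avail [avail[i]] = avail.eraseIdx i := by
            have h1 : PySem.Set.diff avail [avail[i]] = avail.filter (fun x => x != avail[i]) := by
              simp only [PySem.Set.diff]
              apply List.filter_congr
              intro x _
              simp [bne, ← Bool.beq_eq_decide_eq]
            rw [h1, ← List.Nodup.erase_eq_filter hnd avail[i], List.Nodup.erase_getElem hnd i hi]
          rw [hdiff]
          rw [ih (avail.eraseIdx i) (c + 1) (List.Nodup.eraseIdx i hnd)
            (by rw [List.length_eraseIdx_of_lt hi]; omega)]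
      show (PySem.List.max? _ (fun x => x)).getD 0 = _
      rw [hmap, max?_getD_eq_bigmax]
      · rfl
      · simp only [ne_eq, List.map_eq_nil_iff, List.range_eq_nil]
        omega

-- ===== VERDICT (by name: the statement is the Claim_ definition above) =====
theorem solution_spec : Claim_equal_solution := by
  intro ability _ _
  unfold Spec_solution solution solution_alt
  simp only []
  have hlen : (PySem.List.pyRange 0 (ability.length : Int) 1).length = ability.length := by
    rw [PySem.List.length_pyRange_one]; simp
  by_cases hnm : ability.length < (PySem.List.pyGetD ability 0 []).length
  · rw [if_pos hnm]
    rw [PySem.List.permutations_eq_nil_of_length_lt _ _ (by rw [hlen]; exact hnm)]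
    rfl
  · rw [if_neg hnm]
    rw [Nat.not_lt] at hnm
    have hfun : ∀ (ans : Int), ∀ com ∈ PySem.List.permutations (PySem.List.pyRange 0 (ability.length : Int) 1) (PySem.List.pyGetD ability 0 []).length,
        max ans (((PySem.List.enumerate com 0).map (fun iv => pvAt ability iv.2 iv.1)).sum) =
          max ans (0 + scoreA ability 0 com) := by
      intro ans com _
      rw [zero_add]; rfl
    rw [PySem.List.foldl_congr_mem _ _ _ _ hfun]
    rw [main_fold ability _ _ _ _ _ (by rw [hlen]; exact hnm)]
    rw [PySem.Set.ofList_eq_self_of_nodup _ (PySem.List.nodup_pyRange_one 0 _)]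
    rw [bestAux_eq_bestL ability _ _ _ (PySem.List.nodup_pyRange_one 0 _) (by rw [hlen]; exact hnm)]
    rw [zero_add]
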